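-- pv_equiv track=rewrite | github.com/jgfranco/formation | 2024_05/activeDeliveryTime.py | activeDeliveryTime
-- ===== SOURCE A (Python) =====
-- def activeDeliveryTime(events):
--
--   startTime = None
--   activeOrderCount = 0
--   TotalActiveTime = 0
--
--   for event in events:
--     orderNumber, timestamp, eventType = event
--     if eventType == 0:
--       if activeOrderCount == 0:
--         startTime = timestamp
--       activeOrderCount +=1
--     elif eventType == 1:
--       if activeOrderCount ==1:
--         TotalActiveTime += timestamp -  startTime
--       activeOrderCount -=1
--
--   return TotalActiveTime
-- ===== SOURCE B (Python) =====
-- def activeDeliveryTime(events):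
--   # Sweep over gaps between consecutive events: accumulate the gap into the
--   # current run while orders are active, flush the run into the total when the
--   # active count returns to zero.
--   prev = None
--   active = 0
--   run = 0
--   total = 0
--   for _, timestamp, eventType in events:
--     if prev is not None and active > 0:
--       run += timestamp - prev
--     if eventType == 0:
--       active += 1
--     elif eventType == 1:
--       active -= 1
--       if active == 0:
--         total += run
--         run = 0
--     prev = timestamp
--   return total
-- ===== Notes on version B (the rewrite author's own statement) =====
-- stated objective: alternative
-- what changed: Replaces A's remembered start-timestamp plus 0->1/1->0 transition special-cases with an interval sweep that accumulates each gap between consecutive events while the active count is positive and flushes the accumulated run when the count returns to zero.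
import Mathlib
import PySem

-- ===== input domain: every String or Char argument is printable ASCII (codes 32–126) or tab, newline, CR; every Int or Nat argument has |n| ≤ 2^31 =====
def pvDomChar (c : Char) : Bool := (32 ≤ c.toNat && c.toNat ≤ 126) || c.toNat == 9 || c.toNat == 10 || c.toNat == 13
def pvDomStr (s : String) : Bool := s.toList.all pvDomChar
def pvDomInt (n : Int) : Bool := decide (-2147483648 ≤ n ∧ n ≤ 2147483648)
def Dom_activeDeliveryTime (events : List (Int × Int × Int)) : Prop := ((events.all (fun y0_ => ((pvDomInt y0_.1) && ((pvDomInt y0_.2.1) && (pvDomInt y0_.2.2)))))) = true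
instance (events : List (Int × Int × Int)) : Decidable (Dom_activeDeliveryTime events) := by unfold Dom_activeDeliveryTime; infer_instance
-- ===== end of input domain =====

-- B replaces A's remembered start-timestamp and 0->1/1->0 special-cases with a gap-sweep
-- that accumulates inter-event gaps while orders are active and flushes runs at count zero
-- (alternative decomposition, same O(n) cost).


-- ===== PORT A =====
-- state: (startTime, activeOrderCount, TotalActiveTime)
-- `timestamp - startTime` in A is only ever evaluated with startTime set (activeOrderCount
-- reaches 1 only through the branch that sets startTime), so `.getD 0` is never the fallback.
def stepA (st : Option Int × Int × Int) (ev : Int × Int × Int) : Option Int × Int × Int :=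
  let startTime := st.1
  let activeOrderCount := st.2.1
  let totalActiveTime := st.2.2
  let timestamp := ev.2.1
  let eventType := ev.2.2
  if eventType = 0 then
    ((if activeOrderCount = 0 then some timestamp else startTime),
     activeOrderCount + 1, totalActiveTime)
  else if eventType = 1 then
    (startTime, activeOrderCount - 1,
     (if activeOrderCount = 1 then totalActiveTime + (timestamp - startTime.getD 0)
      else totalActiveTime))
  else st

def activeDeliveryTime (events : List (Int × Int × Int)) : Int :=
  (events.foldl stepA (none, 0, 0)).2.2

-- ===== PORT B =====
-- state: (prev, active, run, total)
def stepB (st : Option Int × Int × Int × Int) (ev : Int × Int × Int) : Option Int × Int × Int × Int :=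
  let prev := st.1
  let active := st.2.1
  let timestamp := ev.2.1
  let eventType := ev.2.2
  let run := (match prev with
              | some pt => if 0 < active then st.2.2.1 + (timestamp - pt) else st.2.2.1
              | none => st.2.2.1)
  let total := st.2.2.2
  if eventType = 0 then
    (some timestamp, active + 1, run, total)
  else if eventType = 1 then
    (if active - 1 = 0 then (some timestamp, active - 1, 0, total + run)
     else (some timestamp, active - 1, run, total))
  else
    (some timestamp, active, run, total)

def activeDeliveryTime_alt (events : List (Int × Int × Int)) : Int :=
  (events.foldl stepB (none, 0, 0, 0)).2.2.2

-- ===== PRECONDITION & SPEC =====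
def Spec_activeDeliveryTime (events : List (Int × Int × Int)) (out : Int) : Prop := out = activeDeliveryTime_alt events
instance (events : List (Int × Int × Int)) (out : Int) : Decidable (Spec_activeDeliveryTime events out) := by unfold Spec_activeDeliveryTime; infer_instance

-- ===== CLAIM (what is proved, stated in full; the proofs are below) =====
def Claim_equal_activeDeliveryTime : Prop := ∀ (events : List (Int × Int × Int)), Dom_activeDeliveryTime events → Spec_activeDeliveryTime events (activeDeliveryTime events)

-- ===== LEMMAS AND PROOFS =====

-- the coupling invariant between A's state and B's state
def pvInv (sa : Option Int × Int × Int) (sb : Option Int × Int × Int × Int) : Prop :=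
  sa.2.1 = sb.2.1 ∧ sa.2.2 = sb.2.2.2 ∧
  (sa.2.1 ≤ 0 → sb.2.2.1 = 0) ∧
  (0 < sa.2.1 → ∃ pt st, sb.1 = some pt ∧ sa.1 = some st ∧ sb.2.2.1 = pt - st)

theorem pvInvStep (sa : Option Int × Int × Int) (sb : Option Int × Int × Int × Int)
    (ev : Int × Int × Int) (h : pvInv sa sb) : pvInv (stepA sa ev) (stepB sb ev) := by
  obtain ⟨s, c, T⟩ := sa
  obtain ⟨p, a, r, T'⟩ := sb
  obtain ⟨n, t, e⟩ := ev
  obtain ⟨hc, hT, hz, hp⟩ := h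
  simp only at hc hT hz hp
  subst hc; subst hT
  by_cases h0 : e = 0
  · simp only [pvInv, stepA, stepB, if_pos h0]
    refine ⟨by simp, by simp, ?_, ?_⟩
    · intro hle
      have hr : r = 0 := hz (by omega)
      cases p with
      | none => exact hr
      | some pt => simpa [show ¬ (0 < c) by omega] using hr
    · intro hlt
      by_cases hc0 : c = 0
      · subst hc0
        refine ⟨t, t, rfl, by simp, ?_⟩
        have hr : r = 0 := hz le_rfl
        cases p with
        | none => simpa using hr
        | some pt => simpa using hr
      · by_cases hcp : 0 < c
        · obtain ⟨pt, st, hpt, hst, hr⟩ := hp hcp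
          subst hpt
          refine ⟨t, st, rfl, by rw [if_neg hc0]; exact hst, ?_⟩
          simp only [if_pos hcp, hr]
          ring
        · omega
  · by_cases h1 : e = 1
    · simp only [pvInv, stepA, stepB, if_neg h0, if_pos h1]
      by_cases hc1 : c = 1
      · subst hc1
        obtain ⟨pt, st, hpt, hst, hr⟩ := hp one_pos
        subst hpt
        refine ⟨by simp, ?_, ?_, ?_⟩
        · simp [hst, hr]
        · intro _; simp
        · intro hlt
          exact absurd hlt (by norm_num)
      · have hsub : ¬ (c - 1 = 0) := by omega
        simp only [if_neg hc1, if_neg hsub]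
        by_cases hcp : 0 < c
        · obtain ⟨pt, st, hpt, hst, hr⟩ := hp hcp
          subst hpt
          refine ⟨by simp, by simp, fun hle => absurd hle (by omega), ?_⟩
          intro hlt
          refine ⟨t, st, rfl, hst, ?_⟩
          simp only [if_pos hcp, hr]
          ring
        · have hr : r = 0 := hz (by omega)
          refine ⟨by simp, by simp, ?_, fun hlt => absurd hlt (by omega)⟩
          intro _
          cases p with
          | none => exact hr
          | some pt => simpa [show ¬ (0 < c) from hcp] using hr
    · simp only [pvInv, stepA, stepB, if_neg h0, if_neg h1]
      refine ⟨by simp, by simp, ?_, ?_⟩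
      · intro hle
        have hr : r = 0 := hz hle
        cases p with
        | none => exact hr
        | some pt => simpa [show ¬ (0 < c) by omega] using hr
      · intro hlt
        obtain ⟨pt, st, hpt, hst, hr⟩ := hp hlt
        subst hpt
        refine ⟨t, st, rfl, hst, ?_⟩
        simp only [if_pos hlt, hr]
        ring

theorem pvInvFoldl (events : List (Int × Int × Int)) (sa : Option Int × Int × Int)
    (sb : Option Int × Int × Int × Int) (h : pvInv sa sb) :
    pvInv (events.foldl stepA sa) (events.foldl stepB sb) := by
  induction events generalizing sa sb with
  | nil => exact h
  | cons ev rest ih => exact ih _ _ (pvInvStep sa sb ev h)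

-- ===== VERDICT (by name: the statement is the Claim_ definition above) =====
theorem activeDeliveryTime_spec : Claim_equal_activeDeliveryTime := by
  intro events _
  have h := pvInvFoldl events (none, 0, 0) (none, 0, 0, 0)
    ⟨rfl, rfl, fun _ => rfl, fun hlt => absurd hlt (by norm_num)⟩
  exact h.2.1
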